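-- pv_equiv track=rewrite | github.com/Stefan9283/Recreational-Coding | AdventOfCode/2015/day11/p1.py | has2orMorePairs
-- ===== SOURCE A (Python) =====
-- def has2orMorePairs(s: str) -> bool:
--     count = 0
--     i = 0
--     while i < len(s) - 1 and count < 2:
--         if s[i] == s[i + 1]:
--             count += 1
--             i = i + 2
--         else:
--             i += 1
--
--     return count == 2
-- ===== SOURCE B (Python) =====
-- def has2orMorePairs(s: str) -> bool:
--     # streaming run-length encoding: non-overlapping adjacent pairs = sum of run_len // 2
--     total = 0
--     last = None
--     run = 0
--     for c in s:
--         if c == last: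
--             run += 1
--         else:
--             total += run // 2
--             last = c
--             run = 1
--     return total + run // 2 >= 2
-- ===== Notes on version B (the rewrite author's own statement) =====
-- stated objective: alternative
-- what changed: Replaces the index-jumping capped scan (skip 2 on a match, stop at count 2) with a one-pass streaming run-length encoding that sums run_len//2 over maximal runs and compares the full total to 2.
import Mathlib
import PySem

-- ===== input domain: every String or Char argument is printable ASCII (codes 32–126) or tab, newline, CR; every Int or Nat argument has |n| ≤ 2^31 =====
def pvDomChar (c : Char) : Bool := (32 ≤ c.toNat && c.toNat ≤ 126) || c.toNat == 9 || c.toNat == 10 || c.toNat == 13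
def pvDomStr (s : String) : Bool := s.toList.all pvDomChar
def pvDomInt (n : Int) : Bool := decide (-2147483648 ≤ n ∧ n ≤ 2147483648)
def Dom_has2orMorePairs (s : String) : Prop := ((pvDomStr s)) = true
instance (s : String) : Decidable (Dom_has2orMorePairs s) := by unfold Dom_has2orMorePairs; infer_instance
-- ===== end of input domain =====

-- B replaces A's capped index-jumping pair scan by a streaming run-length encoding (alternative decomposition, same cost).

-- ===== PORT A =====
-- the while loop of A: index i, counter capped at 2, skip 2 on a match
def pvALoop (cs : List Char) (i count : Nat) : Nat :=
  if h : i + 1 < cs.length ∧ count < 2 then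
    if cs[i]'(by omega) == cs[i + 1]'(h.1) then pvALoop cs (i + 2) (count + 1)
    else pvALoop cs (i + 1) count
  else count
termination_by cs.length - i

def has2orMorePairs (s : String) : Bool := pvALoop s.toList 0 0 == 2

-- ===== PORT B =====
-- one step of B's for loop; state = (total, last, run)
def pvBStep (st : Nat × Option Char × Nat) (c : Char) : Nat × Option Char × Nat :=
  match st with
  | (total, last, run) =>
    match last with
    | some d => if c == d then (total, some d, run + 1) else (total + run / 2, some c, 1)
    | none => (total + run / 2, some c, 1)

def has2orMorePairs_alt (s : String) : Bool :=
  let st := s.toList.foldl pvBStep (0, none, 0)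
  decide (2 ≤ st.1 + st.2.2 / 2)

-- ===== PRECONDITION & SPEC =====
def Spec_has2orMorePairs (s : String) (out : Bool) : Prop := out = has2orMorePairs_alt s
instance (s : String) (out : Bool) : Decidable (Spec_has2orMorePairs s out) := by unfold Spec_has2orMorePairs; infer_instance

-- ===== CLAIM (what is proved, stated in full; the proofs are below) =====
def Claim_equal_has2orMorePairs : Prop := ∀ (s : String), Dom_has2orMorePairs s → Spec_has2orMorePairs s (has2orMorePairs s)

-- ===== LEMMAS AND PROOFS =====

-- the uncapped greedy pair count (proof-only reference function)
def pvG : List Char → Nat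
  | [] => 0
  | [_] => 0
  | c :: d :: rest => if c = d then 1 + pvG rest else pvG (d :: rest)

-- pairs in a maximal run: pvG over (replicate k c ++ rest) splits off k/2
theorem pvG_replicate (k : Nat) (c : Char) (rest : List Char)
    (h : rest.head? ≠ some c) :
    pvG (List.replicate k c ++ rest) = k / 2 + pvG rest := by
  induction k using Nat.strong_induction_on with
  | _ k ih =>
    match k with
    | 0 => simp
    | 1 =>
      cases rest with
      | nil => simp [pvG]
      | cons d r =>
        have hdc : ¬ (c = d) := by
          intro he; exact h (by simp [he])
        simp [pvG, hdc]
    | (m + 2) =>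
      have : List.replicate (m + 2) c ++ rest
          = c :: c :: (List.replicate m c ++ rest) := by
        simp [List.replicate_succ]
      rw [this]
      have := ih m (by omega)
      simp [pvG, this]
      omega

-- B's fold from a mid-run state computes total + pvG of the remaining virtual input
theorem pvBStep_invariant (cs : List Char) :
    ∀ (t r : Nat) (c : Char),
    (let st := cs.foldl pvBStep (t, some c, r); st.1 + st.2.2 / 2)
      = t + pvG (List.replicate r c ++ cs) := by
  induction cs with
  | nil =>
    intro t r c
    have h := pvG_replicate r c [] (by simp)
    simp [pvG] at h ⊢
    omega
  | cons d cs ih =>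
    intro t r c
    by_cases hdc : d = c
    · subst hdc
      have hrep : List.replicate r d ++ d :: cs = List.replicate (r + 1) d ++ cs := by
        simp [List.replicate_succ' ]
      simp only [List.foldl_cons, pvBStep, beq_self_eq_true, if_true]
      rw [ih t (r + 1) d, hrep]
    · have hne : (d == c) = false := by simp [hdc]
      simp only [List.foldl_cons, pvBStep, hne, Bool.false_eq_true, if_false]
      rw [ih (t + r / 2) 1 d]
      rw [pvG_replicate r c (d :: cs) (by simpa using hdc)]
      have : List.replicate 1 d ++ cs = d :: cs := by simp
      rw [this]
      omega

-- A's loop computes min 2 (count + pvG of the rest of the string)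
theorem pvG_short (l : List Char) (h : l.length ≤ 1) : pvG l = 0 := by
  match l with
  | [] => rfl
  | [_] => rfl
  | _ :: _ :: _ => simp at h

theorem pvALoop_eq (cs : List Char) : ∀ (n i count : Nat), cs.length - i ≤ n → count ≤ 2 →
    pvALoop cs i count = min 2 (count + pvG (cs.drop i)) := by
  intro n
  induction n with
  | zero =>
    intro i count hle hc
    have hlen : cs.length ≤ i := by omega
    rw [pvALoop, dif_neg (by omega)]
    rw [List.drop_eq_nil_of_le hlen]
    simp [pvG]
    omega
  | succ n ih =>
    intro i count hle hc
    by_cases h : i + 1 < cs.length ∧ count < 2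
    · rw [pvALoop, dif_pos h]
      have h1 : i < cs.length := by omega
      have hdrop : cs.drop i = cs[i] :: cs[i + 1] :: cs.drop (i + 2) := by
        rw [List.drop_eq_getElem_cons h1, List.drop_eq_getElem_cons h.1]
      by_cases heq : cs[i] = cs[i + 1]
      · rw [if_pos (by simp [heq])]
        rw [ih (i + 2) (count + 1) (by omega) (by omega)]
        rw [hdrop]
        simp only [pvG, if_pos heq]
        omega
      · rw [if_neg (by simp [heq])]
        rw [ih (i + 1) count (by omega) hc]
        rw [hdrop, List.drop_eq_getElem_cons h.1]
        simp only [pvG, if_neg heq]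
    · rw [pvALoop, dif_neg h]
      rcases Nat.lt_or_ge (i + 1) cs.length with h1 | h1
      · -- then count = 2
        have hc2 : count = 2 := by omega
        subst hc2; omega
      · have : (cs.drop i).length ≤ 1 := by simp; omega
        rw [pvG_short _ this]
        omega

theorem pvALoop_min (cs : List Char) : pvALoop cs 0 0 = min 2 (pvG cs) := by
  have := pvALoop_eq cs cs.length 0 0 (by omega) (by omega)
  simpa using this

theorem alt_eq_pvG (cs : List Char) :
    (cs.foldl pvBStep (0, none, 0)).1 + (cs.foldl pvBStep (0, none, 0)).2.2 / 2 = pvG cs := by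
  cases cs with
  | nil => rfl
  | cons c rest =>
    have h0 : pvBStep (0, none, 0) c = (0, some c, 1) := by rfl
    simp only [List.foldl_cons, h0]
    have := pvBStep_invariant rest 0 1 c
    simpa using this

theorem has2orMorePairs_spec : Claim_equal_has2orMorePairs := by
  intro s _
  unfold Spec_has2orMorePairs has2orMorePairs has2orMorePairs_alt
  rw [pvALoop_min]
  show (min 2 (pvG s.toList) == 2)
      = decide (2 ≤ (s.toList.foldl pvBStep (0, none, 0)).1 + (s.toList.foldl pvBStep (0, none, 0)).2.2 / 2)
  rw [alt_eq_pvG s.toList]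
  by_cases h : 2 ≤ pvG s.toList
  · rw [Nat.min_eq_left h]
    simp [h]
  · rw [Nat.min_eq_right (by omega)]
    simp [h]
    omega
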